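-- pv_equiv track=rewrite | github.com/Duub3m/PythonPractice | leetcode/leetcode3.py | maxScore
-- ===== SOURCE A (Python) =====
-- def maxScore(s):
--     max_score = 0
--
--     # Iterate through all possible split points
--     for i in range(1, len(s)):
--         left = s[:i]
--         right = s[i:]
--
--         # Calculate the score: number of zeros in left + number of ones in right
--         score = left.count('0') + right.count('1')
--         max_score = max(max_score, score)
--
--     return max_score
--
-- s = "00111"
-- ===== SOURCE B (Python) =====
-- def maxScore(s):
--     # one pass: running zeros-in-left and ones-in-right over every split
--     zeros = 0
--     ones = s.count('1')
--     best = 0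
--     for c in s[:-1]:
--         zeros += (c == '0')
--         ones -= (c == '1')
--         best = max(best, zeros + ones)
--     return best
-- ===== Notes on version B (the rewrite author's own statement) =====
-- stated objective: faster
-- what changed: Replaced the quadratic loop that slices the string and recounts both halves at every split with a single left-to-right pass maintaining running zeros-in-left and ones-in-right counts.
import Mathlib
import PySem

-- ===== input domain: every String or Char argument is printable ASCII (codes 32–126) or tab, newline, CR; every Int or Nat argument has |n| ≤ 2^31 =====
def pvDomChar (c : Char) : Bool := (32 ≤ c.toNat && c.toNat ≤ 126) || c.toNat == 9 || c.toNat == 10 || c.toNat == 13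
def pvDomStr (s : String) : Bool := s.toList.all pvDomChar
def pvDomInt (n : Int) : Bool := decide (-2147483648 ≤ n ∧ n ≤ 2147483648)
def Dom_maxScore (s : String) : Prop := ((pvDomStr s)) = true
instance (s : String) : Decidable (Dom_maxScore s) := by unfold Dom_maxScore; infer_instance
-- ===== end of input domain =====

-- B replaces A's quadratic slice-and-recount over all splits by one linear pass
-- with running zero/one counts (objective: faster, asymptotic).


-- ===== PORT A =====
-- for i in range(1, len(s)): left = s[:i]; right = s[i:]; score = left.count('0') + right.count('1'); max_score = max(max_score, score)
def maxScore (s : String) : Int :=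
  (PySem.List.pyRange 1 (PySem.Str.len s) 1).foldl
    (fun max_score i =>
      let left := PySem.Str.slice s none (some i)
      let right := PySem.Str.slice s (some i) none
      let score : Int := (PySem.Str.count left "0" : Int) + (PySem.Str.count right "1" : Int)
      max max_score score) 0

-- ===== PORT B =====
-- loop body of Source B: zeros += (c == '0'); ones -= (c == '1'); best = max(best, zeros + ones)
def bStep (st : Int × Int × Int) (c : Char) : Int × Int × Int :=
  let zeros := st.1 + (if c = '0' then 1 else 0)
  let ones := st.2.1 - (if c = '1' then 1 else 0)
  (zeros, ones, max st.2.2 (zeros + ones))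

-- zeros = 0; ones = s.count('1'); best = 0; for c in s[:-1]: …; return best
def maxScore_alt (s : String) : Int :=
  ((PySem.Str.slice s none (some (-1))).toList.foldl
    bStep (0, (PySem.Str.count s "1" : Int), 0)).2.2

-- ===== PRECONDITION & SPEC =====
def Spec_maxScore (s : String) (out : Int) : Prop := out = maxScore_alt s
instance (s : String) (out : Int) : Decidable (Spec_maxScore s out) := by unfold Spec_maxScore; infer_instance

-- ===== CLAIM (what is proved, stated in full; the proofs are below) =====
def Claim_equal_maxScore : Prop := ∀ (s : String), Dom_maxScore s → Spec_maxScore s (maxScore s)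

-- ===== LEMMAS AND PROOFS =====

-- str.count with a one-character needle is the character count (no such lemma in PySem)
lemma count_go_singleton (c : Char) :
    ∀ (l : List Char) (fuel acc : Nat), l.length ≤ fuel →
      PySem.Chars.count.go [c] fuel l acc = acc + l.count c := by
  intro l
  induction l with
  | nil => intro fuel acc _; cases fuel <;> simp [PySem.Chars.count.go]
  | cons x t ih =>
      intro fuel acc h
      cases fuel with
      | zero => simp at h
      | succ f =>
          by_cases hx : x = c
          · subst hx
            simp only [PySem.Chars.count.go, List.isPrefixOf, BEq.rfl, Bool.true_and,
              if_true, List.length_cons, List.drop_succ_cons, List.length_nil,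
              List.drop_zero]
            rw [ih f (acc + 1) (by simpa using h)]
            simp
            omega
          · have : ([c].isPrefixOf (x :: t)) = false := by
              simp only [List.isPrefixOf, Bool.and_true,
                beq_eq_false_iff_ne, ne_eq]
              exact fun h' => hx h'.symm
            simp only [PySem.Chars.count.go, this]
            rw [ih f acc (by simp at h; omega)]
            simp [hx]

lemma count_single (c : Char) (l : List Char) :
    PySem.Chars.count l [c] = l.count c := by
  simp [PySem.Chars.count, count_go_singleton c l l.length 0 (le_refl _)]

-- the split score at index i, over the full list
def scoreAt (l : List Char) (i : Int) : Int :=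
  ((l.take i.toNat).count '0' : Int) + ((l.drop i.toNat).count '1' : Int)

-- loop invariant: B's fold over the remaining suffix (minus its last char) computes
-- A's fold over the remaining split indices
lemma loop_eq :
    ∀ (suf pre : List Char) (b : Int),
      (suf.dropLast.foldl bStep
          ((pre.count '0' : Int), (suf.count '1' : Int), b)).2.2
        = (PySem.List.pyRange ((pre.length : Int) + 1)
              ((pre.length : Int) + (suf.length : Int)) 1).foldl
            (fun m i => max m (scoreAt (pre ++ suf) i)) b := by
  intro suf
  induction suf with
  | nil =>
      intro pre b
      rw [PySem.List.pyRange_one_eq_nil (by simp)]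
      simp
  | cons c suf' ih =>
      intro pre b
      cases suf' with
      | nil =>
          rw [PySem.List.pyRange_one_eq_nil (by simp)]
          simp
      | cons d t =>
          rw [PySem.List.pyRange_one_cons (by simp)]
          have hTake : (pre ++ c :: d :: t).take ((pre.length : Int) + 1).toNat
              = pre ++ [c] := by
            have : ((pre.length : Int) + 1).toNat = pre.length + 1 := by omega
            rw [this, List.take_append]
            simp
          have hDrop : (pre ++ c :: d :: t).drop ((pre.length : Int) + 1).toNat
              = d :: t := by
            have : ((pre.length : Int) + 1).toNat = pre.length + 1 := by omega
            rw [this, List.drop_append]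
            simp
          simp only [List.foldl_cons, List.dropLast_cons₂]
          have hstep : bStep ((pre.count '0' : Int), ((c :: d :: t).count '1' : Int), b) c
              = (((pre ++ [c]).count '0' : Int), ((d :: t).count '1' : Int),
                 max b (scoreAt (pre ++ c :: d :: t) ((pre.length : Int) + 1))) := by
            simp only [bStep, scoreAt, hTake, hDrop, List.count_append, List.count_cons,
              Prod.mk.injEq]
            refine ⟨?_, ?_, ?_⟩ <;> by_cases h0 : c = '0' <;> by_cases h1 : c = '1' <;>
              first
                | exact absurd (h0 ▸ h1) (by decide)
                | (simp [h0, h1]; push_cast; ring)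
                | simp [h0, h1]
          rw [hstep, ih (pre ++ [c])]
          have harr : pre ++ [c] ++ d :: t = pre ++ c :: d :: t := by simp
          rw [harr]
          congr 1 <;> push_cast <;> simp <;> ring

-- A's fold body, rewritten from slices to take/drop on the in-range indices
lemma maxScore_eq_fold (s : String) :
    maxScore s = (PySem.List.pyRange 1 (s.toList.length : Int) 1).foldl
      (fun m i => max m (scoreAt s.toList i)) 0 := by
  unfold maxScore
  rw [show PySem.Str.len s = (s.toList.length : Int) from by simp [pysem]]
  apply PySem.List.foldl_congr_mem
  intro m i hi
  have h1 : 1 ≤ i := (PySem.List.mem_pyRange_one.mp hi).1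
  simp only [PySem.Str.count_eq, PySem.Str.toList_slice, PySem.Chars.slice_eq_listSlice]
  rw [PySem.List.slice_to s.toList (by omega : (0:Int) ≤ i), PySem.List.slice_from s.toList (by omega : (0:Int) ≤ i)]
  simp [count_single, scoreAt]

theorem maxScore_alt_eq (s : String) : maxScore s = maxScore_alt s := by
  unfold maxScore_alt
  rw [show (PySem.Str.slice s none (some (-1))).toList = s.toList.dropLast from by
        simp [pysem]]
  rw [show (PySem.Str.count s "1" : Int) = (s.toList.count '1' : Int) from by
        simp [PySem.Str.count_eq, count_single]]
  have := loop_eq s.toList [] 0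
  simp only [List.count_nil, List.length_nil, Nat.cast_zero, zero_add,
    List.nil_append] at this
  rw [maxScore_eq_fold]
  exact this.symm

-- ===== VERDICT (by name: the statement is the Claim_ definition above) =====
theorem maxScore_spec : Claim_equal_maxScore := by
  intro s _
  unfold Spec_maxScore
  exact maxScore_alt_eq s
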